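-- pv_equiv track=rewrite | github.com/yskang/AlgorithmPractice | baekjoon/python/DSHS_bank_16210.py | solution
-- ===== SOURCE A (Python) =====
-- def solution(n: int, banks: list, xs: list, ys: list):
--     x_dic, y_dic = {}, {}
--
--     xs = sorted(xs)
--     ys = sorted(ys)
--     xs = [0] + xs + [0]
--     ys = [0] + ys + [0]
--     sum_left_x = 0
--     sum_right_x = sum(xs[2:])
--     sum_left_y = 0
--     sum_right_y = sum(ys[2:])
--
--     for k in range(1, n+1):
--         x_dic[xs[k]] = (2*k-n-1)*xs[k] - sum_left_x + sum_right_x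
--         y_dic[ys[k]] = (2*k-n-1)*ys[k] - sum_left_y + sum_right_y
--         sum_left_x += xs[k]
--         sum_right_x -= xs[k+1]
--         sum_left_y += ys[k]
--         sum_right_y -= ys[k+1]
--
--     min_distance = 99999999999999999999
--     ans = -1
--     for i, (x, y) in enumerate(banks, 1):
--         if x_dic[x] + y_dic[y] < min_distance:
--             min_distance = x_dic[x] + y_dic[y]
--             ans = i
--
--     return ans
-- ===== SOURCE B (Python) =====
-- def solution(n: int, banks: list, xs: list, ys: list):
--     x_dic = {x: sum(abs(x - t) for t in xs) for x in xs}
--     y_dic = {y: sum(abs(y - t) for t in ys) for y in ys}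
--
--     min_distance = 99999999999999999999
--     ans = -1
--     for i, (x, y) in enumerate(banks, 1):
--         d = x_dic[x] + y_dic[y]
--         if d < min_distance:
--             min_distance = d
--             ans = i
--     return ans
-- ===== Notes on version B (the rewrite author's own statement) =====
-- stated objective: simpler
-- what changed: Replaces the sort + zero-padded prefix/suffix running-sum table build with two dict comprehensions that compute each house coordinate's total distance by a direct scan; the bank argmin loop is kept unchanged.
-- outside the precondition, e.g. on solution(2, [(-1, -2), (-1, 0), (-1, -2)], [-1, 1, -1, 3], [-2, 0, 0, 0]): A returns 1, B returns 2
import Mathlib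
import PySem

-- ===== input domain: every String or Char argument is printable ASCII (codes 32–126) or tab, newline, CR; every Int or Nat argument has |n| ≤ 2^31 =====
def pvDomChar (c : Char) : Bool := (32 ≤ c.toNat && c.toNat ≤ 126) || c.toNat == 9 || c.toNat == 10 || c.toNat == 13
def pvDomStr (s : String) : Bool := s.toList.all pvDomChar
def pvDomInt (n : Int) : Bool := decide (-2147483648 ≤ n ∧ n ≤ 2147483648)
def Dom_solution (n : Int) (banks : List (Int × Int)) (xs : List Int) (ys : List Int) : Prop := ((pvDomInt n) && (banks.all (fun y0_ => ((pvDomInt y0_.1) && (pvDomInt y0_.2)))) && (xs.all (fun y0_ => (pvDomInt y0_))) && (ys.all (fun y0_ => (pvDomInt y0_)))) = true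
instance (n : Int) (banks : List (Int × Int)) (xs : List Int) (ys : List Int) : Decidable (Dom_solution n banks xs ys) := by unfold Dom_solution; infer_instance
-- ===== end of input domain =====

-- B replaces A's sort + padded prefix/suffix running-sum table build with direct per-coordinate
-- distance scans (simpler); the bank argmin loop is unchanged. Equivalence is about return values.

-- ===== PORT A =====
-- transliteration of A: sort, pad with zeros, one loop building both dicts with running sums,
-- then the argmin loop over enumerate(banks, 1).
def solution (n : Int) (banks : List (Int × Int)) (xs : List Int) (ys : List Int) : Int :=
  let xsS := PySem.List.sorted xs (fun v => v) false
  let ysS := PySem.List.sorted ys (fun v => v) false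
  let xsP := [(0 : Int)] ++ xsS ++ [0]
  let ysP := [(0 : Int)] ++ ysS ++ [0]
  let st :=
    (PySem.List.pyRange 1 (n + 1) 1).foldl
      (fun (st : PySem.Dict Int Int × PySem.Dict Int Int × Int × Int × Int × Int) k =>
        -- xs[k] / ys[k]: Pre_solution keeps every index in range (Python raises IndexError otherwise)
        let xk := PySem.List.pyGetD xsP k 0
        let yk := PySem.List.pyGetD ysP k 0
        (st.1.insert xk ((2 * k - n - 1) * xk - st.2.2.1 + st.2.2.2.1),
         st.2.1.insert yk ((2 * k - n - 1) * yk - st.2.2.2.2.1 + st.2.2.2.2.2),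
         st.2.2.1 + xk,
         st.2.2.2.1 - PySem.List.pyGetD xsP (k + 1) 0,
         st.2.2.2.2.1 + yk,
         st.2.2.2.2.2 - PySem.List.pyGetD ysP (k + 1) 0))
      (PySem.Dict.empty, PySem.Dict.empty, 0, (PySem.List.slice xsP (some 2) none).sum,
       0, (PySem.List.slice ysP (some 2) none).sum)
  ((PySem.List.enumerate banks 1).foldl
      (fun (mc : Int × Int) p =>
        -- x_dic[x] + y_dic[y]: Pre_solution guarantees the keys are present (KeyError otherwise)
        if st.1.getD p.2.1 0 + st.2.1.getD p.2.2 0 < mc.1 then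
          (st.1.getD p.2.1 0 + st.2.1.getD p.2.2 0, p.1)
        else mc)
      (99999999999999999999, -1)).2

-- ===== PORT B =====
-- transliteration of B: dict comprehensions of direct distance sums, same final loop.
def solution_alt (n : Int) (banks : List (Int × Int)) (xs : List Int) (ys : List Int) : Int :=
  let xd := xs.foldl (fun (d : PySem.Dict Int Int) x => d.insert x ((xs.map (fun t => |x - t|)).sum)) PySem.Dict.empty
  let yd := ys.foldl (fun (d : PySem.Dict Int Int) y => d.insert y ((ys.map (fun t => |y - t|)).sum)) PySem.Dict.empty
  ((PySem.List.enumerate banks 1).foldl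
      (fun (mc : Int × Int) p =>
        if xd.getD p.2.1 0 + yd.getD p.2.2 0 < mc.1 then
          (xd.getD p.2.1 0 + yd.getD p.2.2 0, p.1)
        else mc)
      (99999999999999999999, -1)).2

-- ===== PRECONDITION & SPEC =====
-- Pre_ restricts to the natural domain of the problem: n is the number of houses and every bank
-- shares its x with some house and its y with some house (otherwise both A and B raise KeyError;
-- A raises IndexError for n > len(xs)); with no banks at all the lists are never consulted, so any
-- n ≤ len is admitted there too. Excluded although A returns: banks ≠ [] with n < len(xs), where
-- A's running-sum table is computed over a truncated prefix of the houses, a malformed-input artefact.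
def Pre_solution (n : Int) (banks : List (Int × Int)) (xs : List Int) (ys : List Int) : Prop :=
  (n = xs.length ∧ n = ys.length ∧ ∀ p ∈ banks, p.1 ∈ xs ∧ p.2 ∈ ys)
  ∨ (banks = [] ∧ n ≤ xs.length ∧ n ≤ ys.length)
instance (n : Int) (banks : List (Int × Int)) (xs : List Int) (ys : List Int) : Decidable (Pre_solution n banks xs ys) := by unfold Pre_solution; infer_instance

def pvWitness_solution : Int × (List (Int × Int)) × List Int × List Int := (2, [(1, 2)], [1, 3], [2, 2])

def Spec_solution (n : Int) (banks : List (Int × Int)) (xs : List Int) (ys : List Int) (out : Int) : Prop := out = solution_alt n banks xs ys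
instance (n : Int) (banks : List (Int × Int)) (xs : List Int) (ys : List Int) (out : Int) : Decidable (Spec_solution n banks xs ys out) := by unfold Spec_solution; infer_instance

-- ===== CLAIM (what is proved, stated in full; the proofs are below) =====
def Claim_equal_solution : Prop := ∀ (n : Int) (banks : List (Int × Int)) (xs : List Int) (ys : List Int), Dom_solution n banks xs ys → Pre_solution n banks xs ys → Spec_solution n banks xs ys (solution n banks xs ys)

-- ===== LEMMAS AND PROOFS =====

-- one side (x or y) of A's build loop, as its own fold
def sideFold (n : Int) (pad : List Int) (ks : List Int) (d : PySem.Dict Int Int) (sl sr : Int) :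
    PySem.Dict Int Int × Int × Int :=
  ks.foldl
    (fun st k =>
      let v := PySem.List.pyGetD pad k 0
      (st.1.insert v ((2 * k - n - 1) * v - st.2.1 + st.2.2),
       st.2.1 + v, st.2.2 - PySem.List.pyGetD pad (k + 1) 0))
    (d, sl, sr)

-- A's combined 6-tuple fold splits into two independent sideFolds
theorem bigFold_split (n : Int) (xsP ysP : List Int) (ks : List Int)
    (xd yd : PySem.Dict Int Int) (slx srx sly sry : Int) :
    ks.foldl
      (fun (st : PySem.Dict Int Int × PySem.Dict Int Int × Int × Int × Int × Int) k =>
        let xk := PySem.List.pyGetD xsP k 0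
        let yk := PySem.List.pyGetD ysP k 0
        (st.1.insert xk ((2 * k - n - 1) * xk - st.2.2.1 + st.2.2.2.1),
         st.2.1.insert yk ((2 * k - n - 1) * yk - st.2.2.2.2.1 + st.2.2.2.2.2),
         st.2.2.1 + xk,
         st.2.2.2.1 - PySem.List.pyGetD xsP (k + 1) 0,
         st.2.2.2.2.1 + yk,
         st.2.2.2.2.2 - PySem.List.pyGetD ysP (k + 1) 0))
      (xd, yd, slx, srx, sly, sry)
    = (let a := sideFold n xsP ks xd slx srx
       let b := sideFold n ysP ks yd sly sry
       (a.1, b.1, a.2.1, a.2.2, b.2.1, b.2.2)) := by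
  induction ks generalizing xd yd slx srx sly sry with
  | nil => simp [sideFold]
  | cons k ks ih => simp only [List.foldl_cons, sideFold] at *; exact ih _ _ _ _ _ _

theorem padGet (s : List Int) (i : Nat) (hi : i < s.length) :
    PySem.List.pyGetD ([(0 : Int)] ++ s ++ [0]) ((i : Int) + 1) 0 = s[i] := by
  have h : ((i : Int) + 1) = ((i + 1 : Nat) : Int) := by push_cast; ring
  rw [h, PySem.List.pyGetD_natCast]
  simp [List.getD, List.getElem?_append_left hi, hi]

theorem padGet_last (s : List Int) :
    PySem.List.pyGetD ([(0 : Int)] ++ s ++ [0]) ((s.length : Int) + 1) 0 = 0 := by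
  have h : ((s.length : Int) + 1) = ((s.length + 1 : Nat) : Int) := by push_cast; ring
  rw [h, PySem.List.pyGetD_natCast]
  simp [List.getD]

theorem sum_map_sub_const (l : List Int) (v : Int) :
    (l.map (fun t => v - t)).sum = l.length * v - l.sum := by
  induction l with
  | nil => simp
  | cons a t ih => simp [ih]; ring

theorem sum_map_sub_const' (l : List Int) (v : Int) :
    (l.map (fun t => t - v)).sum = l.sum - l.length * v := by
  induction l with
  | nil => simp
  | cons a t ih => simp [ih]; ring

-- the prefix/suffix-sum formula computes the total distance to the sorted list s
theorem formula_eq (s : List Int) (hs : s.Pairwise (· ≤ ·)) (j : Nat) (hj : j < s.length) :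
    (2 * ((j : Int) + 1) - s.length - 1) * s[j] - (s.take j).sum + (s.drop (j + 1)).sum
      = (s.map (fun t => |s[j] - t|)).sum := by
  have hdec : s = s.take j ++ s[j] :: s.drop (j + 1) := by
    conv_lhs => rw [← List.take_append_drop j s]
    rw [List.drop_eq_getElem_cons hj]
  have hpw : (s.take j ++ s[j] :: s.drop (j + 1)).Pairwise (· ≤ ·) := by rw [← hdec]; exact hs
  rw [List.pairwise_append] at hpw
  obtain ⟨h1, h2, h3⟩ := hpw
  rw [List.pairwise_cons] at h2
  have hL : ∀ t ∈ s.take j, t ≤ s[j] := fun t ht => h3 t ht _ (List.mem_cons_self)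
  have hR : ∀ t ∈ s.drop (j + 1), s[j] ≤ t := h2.1
  have eL : (s.take j).map (fun t => |s[j] - t|) = (s.take j).map (fun t => s[j] - t) :=
    List.map_congr_left (fun t ht => abs_of_nonneg (by linarith [hL t ht]))
  have eR : (s.drop (j + 1)).map (fun t => |s[j] - t|) = (s.drop (j + 1)).map (fun t => t - s[j]) :=
    List.map_congr_left (fun t ht => by rw [abs_sub_comm]; exact abs_of_nonneg (by linarith [hR t ht]))
  rw [show (s.map (fun t => |s[j] - t|)).sum
        = ((s.take j ++ s[j] :: s.drop (j + 1)).map (fun t => |s[j] - t|)).sum from by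
      rw [← hdec]]
  rw [List.map_append, List.sum_append, List.map_cons, List.sum_cons, eL, eR,
    sum_map_sub_const, sum_map_sub_const']
  have hlt : (s.take j).length = j := List.length_take_of_le (le_of_lt hj)
  have hld : ((s.drop (j + 1)).length : Int) = (s.length : Int) - j - 1 := by
    rw [List.length_drop]; omega
  rw [hlt, hld]
  simp
  ring

-- the x/y side of A's loop, started at step j+1, performs exactly the plain inserts over s.drop j
theorem side_main (s : List Int) (hs : s.Pairwise (· ≤ ·)) :
    ∀ (m j : Nat), j + m = s.length → ∀ d : PySem.Dict Int Int,
      (sideFold (s.length : Int) ([(0 : Int)] ++ s ++ [0])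
          (PySem.List.pyRange ((j : Int) + 1) ((s.length : Int) + 1) 1)
          d ((s.take j).sum) ((s.drop (j + 1)).sum)).1
        = (s.drop j).foldl (fun d v => d.insert v ((s.map (fun t => |v - t|)).sum)) d := by
  intro m
  induction m with
  | zero =>
    intro j hj d
    have hj' : j = s.length := by omega
    subst hj'
    rw [PySem.List.pyRange_one_eq_nil (by omega), List.drop_length]
    rfl
  | succ m ih =>
    intro j hj d
    have hjlt : j < s.length := by omega
    rw [PySem.List.pyRange_one_cons (by omega)]
    have hstep : sideFold (s.length : Int) ([(0 : Int)] ++ s ++ [0])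
        (((j : Int) + 1) :: PySem.List.pyRange ((j : Int) + 1 + 1) ((s.length : Int) + 1) 1)
        d ((s.take j).sum) ((s.drop (j + 1)).sum)
      = sideFold (s.length : Int) ([(0 : Int)] ++ s ++ [0])
          (PySem.List.pyRange ((j : Int) + 1 + 1) ((s.length : Int) + 1) 1)
          (d.insert s[j] ((s.map (fun t => |s[j] - t|)).sum))
          ((s.take (j + 1)).sum) ((s.drop (j + 2)).sum) := by
      show sideFold _ _ _ (d.insert _ _) _ _ = _
      rw [padGet s j hjlt]
      congr 1
      · rw [formula_eq s hs j hjlt]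
      · rw [List.take_add_one]
        simp [hjlt]
      · by_cases hlast : j + 1 < s.length
        · rw [show ((j : Int) + 1 + 1) = ((j + 1 : Nat) : Int) + 1 by push_cast; ring,
            padGet s (j + 1) hlast, List.drop_eq_getElem_cons hlast, List.sum_cons]
          ring
        · have hje : j + 1 = s.length := by omega
          rw [show ((j : Int) + 1 + 1) = ((s.length : Int) + 1) by omega, padGet_last]
          rw [List.drop_eq_nil_of_le (le_of_eq hje.symm), List.drop_eq_nil_of_le (by omega)]
          simp
    rw [hstep]
    rw [show ((j : Int) + 1 + 1) = (((j + 1 : Nat) : Int) + 1) by push_cast; ring]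
    rw [ih (j + 1) (by omega) _]
    rw [List.drop_eq_getElem_cons hjlt, List.foldl_cons]

theorem getD_foldl_insert_not_mem (g : Int → Int) (keys : List Int) (d : PySem.Dict Int Int)
    (v : Int) (hv : v ∉ keys) :
    (keys.foldl (fun d k => d.insert k (g k)) d).getD v 0 = d.getD v 0 := by
  induction keys generalizing d with
  | nil => rfl
  | cons k rest ih =>
    rw [List.foldl_cons, ih _ (fun h => hv (List.mem_cons_of_mem _ h))]
    have hne : v ≠ k := fun h => hv (by simp [h])
    simp [PySem.Dict.getD_insert_of_ne, hne]

theorem getD_foldl_insert_fun (g : Int → Int) (keys : List Int) (d : PySem.Dict Int Int)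
    (v : Int) (hv : v ∈ keys) :
    (keys.foldl (fun d k => d.insert k (g k)) d).getD v 0 = g v := by
  induction keys generalizing d with
  | nil => cases hv
  | cons k rest ih =>
    rw [List.foldl_cons]
    by_cases h : v ∈ rest
    · exact ih _ h
    · have hvk : v = k := by rcases List.mem_cons.mp hv with h' | h' <;> [exact h'; exact absurd h' h]
      subst hvk
      rw [getD_foldl_insert_not_mem g rest _ v h, PySem.Dict.getD_insert_self]

-- A's x/y dict and B's x/y dict agree on every house coordinate
theorem dicts_agree (n : Int) (xs : List Int) (hn : n = (xs.length : Int)) (v : Int) (hv : v ∈ xs) :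
    ((sideFold n ([(0 : Int)] ++ PySem.List.sorted xs (fun v => v) false ++ [0])
        (PySem.List.pyRange 1 (n + 1) 1) PySem.Dict.empty 0
        ((PySem.List.slice ([(0 : Int)] ++ PySem.List.sorted xs (fun v => v) false ++ [0]) (some 2) none).sum)).1).getD v 0
      = (xs.foldl (fun (d : PySem.Dict Int Int) x => d.insert x ((xs.map (fun t => |x - t|)).sum)) PySem.Dict.empty).getD v 0 := by
  subst hn
  set s := PySem.List.sorted xs (fun v => v) false with hsdef
  have hperm : s.Perm xs := PySem.List.sorted_perm xs (fun v => v) false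
  have hlen : s.length = xs.length := hperm.length_eq
  have hs : s.Pairwise (· ≤ ·) := PySem.List.sorted_pairwise xs (fun v => v)
  have hsr : (PySem.List.slice ([(0 : Int)] ++ s ++ [0]) (some 2) none).sum = (s.drop 1).sum := by
    rw [PySem.List.slice_from _ (by norm_num)]
    cases s with
    | nil => simp
    | cons a t => simp
  have h0 := side_main s hs s.length 0 (by omega) PySem.Dict.empty
  norm_num at h0
  rw [hsr, ← hlen]
  norm_num
  rw [h0]
  have hg : ∀ w : Int, (s.map (fun t => |w - t|)).sum = (xs.map (fun t => |w - t|)).sum :=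
    fun w => (hperm.map (fun t => |w - t|)).sum_eq
  have hfun : (fun (d : PySem.Dict Int Int) w => d.insert w ((s.map (fun t => |w - t|)).sum))
      = (fun (d : PySem.Dict Int Int) w => d.insert w ((xs.map (fun t => |w - t|)).sum)) := by
    funext d w; rw [hg w]
  rw [hfun]
  rw [getD_foldl_insert_fun _ s _ v ((PySem.List.mem_sorted xs (fun v => v) false v).mpr hv),
    getD_foldl_insert_fun _ xs _ v hv]

-- ===== VERDICT (by name: the statement is the Claim_ definition above) =====
theorem solution_spec : Claim_equal_solution := by
  intro n banks xs ys _ hpre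
  rcases hpre with ⟨hnx, hny, hbanks⟩ | ⟨hbe, -, -⟩
  case inr => subst hbe; rfl
  unfold Spec_solution solution solution_alt
  simp only []
  rw [bigFold_split]
  apply congrArg
  apply PySem.List.foldl_congr_mem
  intro acc p hp
  have hpb : p.2 ∈ banks := by
    have := List.mem_map_of_mem (f := (·.2)) hp
    rwa [PySem.List.map_snd_enumerate] at this
  obtain ⟨hx, hy⟩ := hbanks p.2 hpb
  rw [dicts_agree n xs hnx p.2.1 hx, dicts_agree n ys hny p.2.2 hy]
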